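-- pv_equiv track=rewrite | github.com/gokuloverseeker/TRIP_GENEI | backend/engines/itinerary_generator.py | filter_attractions_by_preference
-- ===== SOURCE A (Python) =====
-- ACTIVITY_DISTRIBUTION = {
--     "adventure":   ["adventure", "adventure", "mixed"],
--     "relaxation":  ["relaxation", "relaxation", "cultural"],
--     "cultural":    ["cultural", "cultural", "mixed"],
--     "spiritual":   ["spiritual", "cultural", "relaxation"],
--     "mixed":       ["cultural", "adventure", "relaxation"],
-- }
--
-- def filter_attractions_by_preference(attractions: list, preference: str) -> list:
--     pref_tags = ACTIVITY_DISTRIBUTION.get(preference, ["mixed"])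
--     scored = []
--     for a in attractions:
--         tags = a.get("tags", ["mixed"])
--         score = sum(1 for t in pref_tags if t in tags)
--         scored.append((score, a))
--     scored.sort(key=lambda x: x[0], reverse=True)
--     return [a for _, a in scored]
-- ===== SOURCE B (Python) =====
-- ACTIVITY_DISTRIBUTION = {
--     "adventure":   ["adventure", "adventure", "mixed"],
--     "relaxation":  ["relaxation", "relaxation", "cultural"],
--     "cultural":    ["cultural", "cultural", "mixed"],
--     "spiritual":   ["spiritual", "cultural", "relaxation"],
--     "mixed":       ["cultural", "adventure", "relaxation"],
-- }
--
-- def filter_attractions_by_preference(attractions: list, preference: str) -> list: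
--     # Bucket sort: scores are bounded by len(pref_tags) <= 3, so one pass into
--     # four buckets (stable within each) replaces the stable comparison sort.
--     pref_tags = ACTIVITY_DISTRIBUTION.get(preference, ["mixed"])
--     buckets = [[], [], [], []]
--     for a in attractions:
--         tags = a.get("tags", ["mixed"])
--         score = sum(1 for t in pref_tags if t in tags)
--         buckets[score].append(a)
--     return buckets[3] + buckets[2] + buckets[1] + buckets[0]
-- ===== Notes on version B (the rewrite author's own statement) =====
-- stated objective: alternative
-- what changed: Replaced the stable comparison sort over (score, attraction) pairs by a single-pass bucket sort into four buckets (scores are bounded by the preference tag list of length <= 3), concatenated in descending score order.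
import Mathlib
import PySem

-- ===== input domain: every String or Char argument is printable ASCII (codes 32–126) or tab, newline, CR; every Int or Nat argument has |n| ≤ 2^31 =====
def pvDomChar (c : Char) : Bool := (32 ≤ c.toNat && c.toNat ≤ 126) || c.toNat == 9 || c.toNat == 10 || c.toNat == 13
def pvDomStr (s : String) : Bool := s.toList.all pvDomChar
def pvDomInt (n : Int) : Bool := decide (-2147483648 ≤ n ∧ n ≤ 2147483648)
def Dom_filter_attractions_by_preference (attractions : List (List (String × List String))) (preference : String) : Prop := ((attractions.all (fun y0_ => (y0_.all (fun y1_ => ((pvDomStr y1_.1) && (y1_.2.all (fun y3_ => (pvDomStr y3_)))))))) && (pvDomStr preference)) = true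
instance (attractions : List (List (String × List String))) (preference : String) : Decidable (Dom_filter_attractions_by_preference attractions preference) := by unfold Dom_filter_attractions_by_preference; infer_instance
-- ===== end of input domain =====

-- Alternative algorithm: B replaces A's stable descending sort by score with a
-- single-pass bucket sort into four buckets (the score is bounded by the
-- preference tag list, length ≤ 3); same cost in practice.

-- shared module constant ACTIVITY_DISTRIBUTION
def pvActivityDistribution : PySem.Dict String (List String) :=
  PySem.Dict.mk
    [("adventure",  ["adventure", "adventure", "mixed"]),
     ("relaxation", ["relaxation", "relaxation", "cultural"]),
     ("cultural",   ["cultural", "cultural", "mixed"]),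
     ("spiritual",  ["spiritual", "cultural", "relaxation"]),
     ("mixed",      ["cultural", "adventure", "relaxation"])]

-- tags = a.get("tags", ["mixed"]); score = sum(1 for t in pref_tags if t in tags)
def pvScore (prefTags : List String) (a : List (String × List String)) : Int :=
  let tags := (PySem.Dict.mk a).getD "tags" ["mixed"]
  prefTags.foldl (fun s t => if tags.contains t then s + 1 else s) 0

-- ===== PORT A =====
def filter_attractions_by_preference (attractions : List (List (String × List String))) (preference : String) : List (List (String × List String)) :=
  let prefTags := pvActivityDistribution.getD preference ["mixed"]
  let scored := attractions.foldl
    (fun acc a => acc ++ [(pvScore prefTags a, a)])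
    ([] : List (Int × List (String × List String)))
  (PySem.List.sorted scored (fun x => x.1) true).map (fun x => x.2)

-- ===== PORT B =====
def filter_attractions_by_preference_alt (attractions : List (List (String × List String))) (preference : String) : List (List (String × List String)) :=
  let prefTags := pvActivityDistribution.getD preference ["mixed"]
  let buckets := attractions.foldl
    (fun (b : List (List (String × List String)) × List (List (String × List String)) × List (List (String × List String)) × List (List (String × List String))) a =>
      let score := pvScore prefTags a
      -- buckets[score].append(a), buckets indexed 0..3 as (b0, b1, b2, b3)
      if score = 3 then (b.1, b.2.1, b.2.2.1, b.2.2.2 ++ [a])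
      else if score = 2 then (b.1, b.2.1, b.2.2.1 ++ [a], b.2.2.2)
      else if score = 1 then (b.1, b.2.1 ++ [a], b.2.2.1, b.2.2.2)
      else (b.1 ++ [a], b.2.1, b.2.2.1, b.2.2.2))
    ([], [], [], [])
  buckets.2.2.2 ++ buckets.2.2.1 ++ buckets.2.1 ++ buckets.1

-- ===== PRECONDITION & SPEC =====
def Spec_filter_attractions_by_preference (attractions : List (List (String × List String))) (preference : String) (out : List (List (String × List String))) : Prop := out = filter_attractions_by_preference_alt attractions preference
instance (attractions : List (List (String × List String))) (preference : String) (out : List (List (String × List String))) : Decidable (Spec_filter_attractions_by_preference attractions preference out) := by unfold Spec_filter_attractions_by_preference; infer_instance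

-- ===== CLAIM (what is proved, stated in full; the proofs are below) =====
def Claim_equal_filter_attractions_by_preference : Prop := ∀ (attractions : List (List (String × List String))) (preference : String), Dom_filter_attractions_by_preference attractions preference → Spec_filter_attractions_by_preference attractions preference (filter_attractions_by_preference attractions preference)

-- ===== LEMMAS AND PROOFS =====

-- the four buckets of a list, by descending key value
def pvBuckets {α : Type} (key : α → Int) (p : List α) : List α :=
  p.filter (fun x => decide (key x = 3)) ++ p.filter (fun x => decide (key x = 2)) ++
  p.filter (fun x => decide (key x = 1)) ++ p.filter (fun x => decide (key x = 0))

theorem pv_insertBy_split {α : Type} (before : α → α → Bool) (x : α) (A B : List α)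
    (hA : ∀ y ∈ A, before x y = false) (hB : ∀ y ∈ B, before x y = true) :
    PySem.List.insertBy before x (A ++ B) = A ++ x :: B := by
  induction A with
  | nil =>
      cases B with
      | nil => simp [PySem.List.insertBy]
      | cons y ys => simp [PySem.List.insertBy, hB y (by simp)]
  | cons a A ih =>
      have ha := hA a (by simp)
      simp [PySem.List.insertBy, ha]
      exact ih (fun y hy => hA y (by simp [hy]))

theorem pv_score_foldl_bounds (tags : List String) (l : List String) : ∀ (s : Int),
    s ≤ l.foldl (fun s t => if tags.contains t then s + 1 else s) s ∧
    l.foldl (fun s t => if tags.contains t then s + 1 else s) s ≤ s + l.length := by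
  induction l with
  | nil => intro s; simp
  | cons t l ih =>
      intro s
      simp only [List.foldl_cons, List.length_cons]
      by_cases h : tags.contains t = true
      · simp only [h, if_true]
        have := ih (s + 1)
        push_cast
        omega
      · simp only [h, Bool.false_eq_true, if_false]
        have := ih s
        push_cast
        omega

theorem pv_prefTags_len (preference : String) :
    (pvActivityDistribution.getD preference ["mixed"]).length ≤ 3 := by
  simp only [pvActivityDistribution, PySem.Dict.getD, PySem.Dict.get?, List.find?]
  split <;> simp_all <;> split <;> simp_all <;> split <;> simp_all <;> split <;> simp_all <;> split <;> simp_all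

theorem pv_score_bounds (preference : String) (a : List (String × List String)) :
    0 ≤ pvScore (pvActivityDistribution.getD preference ["mixed"]) a ∧
    pvScore (pvActivityDistribution.getD preference ["mixed"]) a ≤ 3 := by
  have h := pv_score_foldl_bounds ((PySem.Dict.mk a).getD "tags" ["mixed"])
    (pvActivityDistribution.getD preference ["mixed"]) 0
  have hl := pv_prefTags_len preference
  unfold pvScore
  constructor <;> simp only [] <;> omega

theorem pv_buckets_snoc {α : Type} (key : α → Int) (p : List α) (x : α)
    (h0 : 0 ≤ key x) (h3 : key x ≤ 3) :
    PySem.List.insertBy (fun a b => decide (key b < key a)) x (pvBuckets key p) =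
      pvBuckets key (p ++ [x]) := by
  have hmem3 : ∀ y ∈ p.filter (fun x => decide (key x = 3)), key y = 3 := by
    intro y hy; simpa using (List.mem_filter.mp hy).2
  have hmem2 : ∀ y ∈ p.filter (fun x => decide (key x = 2)), key y = 2 := by
    intro y hy; simpa using (List.mem_filter.mp hy).2
  have hmem1 : ∀ y ∈ p.filter (fun x => decide (key x = 1)), key y = 1 := by
    intro y hy; simpa using (List.mem_filter.mp hy).2
  have hmem0 : ∀ y ∈ p.filter (fun x => decide (key x = 0)), key y = 0 := by
    intro y hy; simpa using (List.mem_filter.mp hy).2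
  have hk : key x = 0 ∨ key x = 1 ∨ key x = 2 ∨ key x = 3 := by omega
  unfold pvBuckets
  rcases hk with hk | hk | hk | hk
  · rw [show ∀ (l1 l2 l3 l4 : List α), l1 ++ l2 ++ l3 ++ l4 = (l1 ++ l2 ++ l3 ++ l4) ++ ([] : List α) by intros; simp]
    rw [pv_insertBy_split _ x ((p.filter (fun x => decide (key x = 3)) ++ p.filter (fun x => decide (key x = 2)) ++ p.filter (fun x => decide (key x = 1)) ++ p.filter (fun x => decide (key x = 0)))) []
      (by intro y hy
          simp only [List.append_assoc, List.mem_append] at hy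
          rcases hy with hy | hy | hy | hy
          · have := hmem3 y hy; simp; omega
          · have := hmem2 y hy; simp; omega
          · have := hmem1 y hy; simp; omega
          · have := hmem0 y hy; simp; omega)
      (by intro y hy; simp at hy)]
    simp [List.filter_append, hk]
  · rw [show ∀ (l1 l2 l3 l4 : List α), l1 ++ l2 ++ l3 ++ l4 = (l1 ++ l2 ++ l3) ++ l4 by intros; simp]
    rw [pv_insertBy_split _ x _ _
      (by intro y hy
          simp only [List.append_assoc, List.mem_append] at hy
          rcases hy with hy | hy | hy
          · have := hmem3 y hy; simp; omega
          · have := hmem2 y hy; simp; omega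
          · have := hmem1 y hy; simp; omega)
      (by intro y hy; have := hmem0 y hy; simp; omega)]
    simp [List.filter_append, hk]
  · rw [show ∀ (l1 l2 l3 l4 : List α), l1 ++ l2 ++ l3 ++ l4 = (l1 ++ l2) ++ (l3 ++ l4) by intros; simp]
    rw [pv_insertBy_split _ x _ _
      (by intro y hy
          simp only [List.mem_append] at hy
          rcases hy with hy | hy
          · have := hmem3 y hy; simp; omega
          · have := hmem2 y hy; simp; omega)
      (by intro y hy
          simp only [List.mem_append] at hy
          rcases hy with hy | hy
          · have := hmem1 y hy; simp; omega
          · have := hmem0 y hy; simp; omega)]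
    simp [List.filter_append, hk]
  · rw [show ∀ (l1 l2 l3 l4 : List α), l1 ++ l2 ++ l3 ++ l4 = l1 ++ (l2 ++ l3 ++ l4) by intros; simp]
    rw [pv_insertBy_split _ x _ _
      (by intro y hy; have := hmem3 y hy; simp; omega)
      (by intro y hy
          simp only [List.append_assoc, List.mem_append] at hy
          rcases hy with hy | hy | hy
          · have := hmem2 y hy; simp; omega
          · have := hmem1 y hy; simp; omega
          · have := hmem0 y hy; simp; omega)]
    simp [List.filter_append, hk]

theorem pv_sorted_buckets {α : Type} (key : α → Int) (xs : List α)
    (h : ∀ x ∈ xs, 0 ≤ key x ∧ key x ≤ 3) :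
    PySem.List.sorted xs key true = pvBuckets key xs := by
  rw [PySem.List.sorted_rev_eq_foldl_insertBy]
  suffices H : ∀ (ys p : List α), (∀ x ∈ ys, 0 ≤ key x ∧ key x ≤ 3) →
      ys.foldl (fun acc x => PySem.List.insertBy (fun a b => decide (key b < key a)) x acc)
        (pvBuckets key p) = pvBuckets key (p ++ ys) by
    have := H xs [] h
    simpa [pvBuckets] using this
  intro ys
  induction ys with
  | nil => intro p _; simp
  | cons x t ih =>
      intro p hall
      simp only [List.foldl_cons]
      rw [pv_buckets_snoc key p x (hall x (by simp)).1 (hall x (by simp)).2,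
        ih (p ++ [x]) (fun y hy => hall y (by simp [hy]))]
      simp

theorem pv_foldl_snoc_map {α β : Type} (f : α → β) (xs : List α) (init : List β) :
    xs.foldl (fun acc a => acc ++ [f a]) init = init ++ xs.map f := by
  induction xs generalizing init with
  | nil => simp
  | cons x t ih => simp [ih]

-- B's bucket loop computes the four filters
theorem pv_alt_foldl (key : List (String × List String) → Int)
    (xs : List (List (String × List String)))
    (h : ∀ x ∈ xs, 0 ≤ key x ∧ key x ≤ 3)
    (b0 b1 b2 b3 : List (List (String × List String))) :
    xs.foldl (fun b a =>
      if key a = 3 then (b.1, b.2.1, b.2.2.1, b.2.2.2 ++ [a])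
      else if key a = 2 then (b.1, b.2.1, b.2.2.1 ++ [a], b.2.2.2)
      else if key a = 1 then (b.1, b.2.1 ++ [a], b.2.2.1, b.2.2.2)
      else (b.1 ++ [a], b.2.1, b.2.2.1, b.2.2.2)) (b0, b1, b2, b3) =
    (b0 ++ xs.filter (fun x => decide (key x = 0)),
     b1 ++ xs.filter (fun x => decide (key x = 1)),
     b2 ++ xs.filter (fun x => decide (key x = 2)),
     b3 ++ xs.filter (fun x => decide (key x = 3))) := by
  induction xs generalizing b0 b1 b2 b3 with
  | nil => simp
  | cons x t ih =>
      have hx := h x (by simp)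
      have ht : ∀ y ∈ t, 0 ≤ key y ∧ key y ≤ 3 := fun y hy => h y (by simp [hy])
      have hk : key x = 0 ∨ key x = 1 ∨ key x = 2 ∨ key x = 3 := by omega
      simp only [List.foldl_cons]
      rcases hk with hk | hk | hk | hk <;>
        simp [hk, ih ht]

-- ===== VERDICT (by name: the statement is the Claim_ definition above) =====
theorem filter_attractions_by_preference_spec : Claim_equal_filter_attractions_by_preference := by
  intro attractions preference _
  unfold Spec_filter_attractions_by_preference
  unfold filter_attractions_by_preference filter_attractions_by_preference_alt
  simp only []
  set pt := pvActivityDistribution.getD preference ["mixed"] with hpt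
  rw [pv_foldl_snoc_map (fun a => (pvScore pt a, a)) attractions []]
  have hb : ∀ x ∈ (attractions.map (fun a => (pvScore pt a, a))),
      0 ≤ x.1 ∧ x.1 ≤ 3 := by
    intro x hx
    simp only [List.mem_map] at hx
    obtain ⟨a, _, rfl⟩ := hx
    exact pv_score_bounds preference a
  rw [List.nil_append,
    pv_sorted_buckets (fun (x : Int × List (String × List String)) => x.1)
      (attractions.map (fun a => (pvScore pt a, a))) hb,
    pv_alt_foldl (fun a => pvScore pt a) attractions
      (fun x _ => pv_score_bounds preference x) [] [] [] []]
  unfold pvBuckets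
  simp [List.filter_map, Function.comp_def]
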